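-- pv_equiv track=rewrite | github.com/kyungho222/hireme | backend/github.py | _detect_routing
-- ===== SOURCE A (Python) =====
-- from typing import Any, Dict, List, Optional, Tuple
--
-- def _detect_routing(repo_data: Dict) -> str:
--     """라우팅 라이브러리 감지"""
--     external_libs = repo_data.get('external_libraries_hint', [])
--
--     if any('react-router' in lib.lower() for lib in external_libs):
--         return 'React Router'
--     elif any('next' in lib.lower() for lib in external_libs):
--         return 'Next.js Router'
--     else:
--         return '기본 라우팅'
-- ===== SOURCE B (Python) =====
-- def _detect_routing(repo_data):
--     """라우팅 라이브러리 감지 (single pass with deferred 'next' flag)"""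
--     found_next = False
--     for lib in repo_data.get('external_libraries_hint', []):
--         low = lib.lower()
--         if 'react-router' in low:
--             return 'React Router'
--         if 'next' in low:
--             found_next = True
--     return 'Next.js Router' if found_next else '기본 라우팅'
-- ===== Notes on version B (the rewrite author's own statement) =====
-- stated objective: alternative
-- what changed: Replaces the two independent any(...) scans over the hint list with a single loop that returns 'React Router' immediately and defers 'next' matches to a boolean flag resolved after the loop.
import Mathlib
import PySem

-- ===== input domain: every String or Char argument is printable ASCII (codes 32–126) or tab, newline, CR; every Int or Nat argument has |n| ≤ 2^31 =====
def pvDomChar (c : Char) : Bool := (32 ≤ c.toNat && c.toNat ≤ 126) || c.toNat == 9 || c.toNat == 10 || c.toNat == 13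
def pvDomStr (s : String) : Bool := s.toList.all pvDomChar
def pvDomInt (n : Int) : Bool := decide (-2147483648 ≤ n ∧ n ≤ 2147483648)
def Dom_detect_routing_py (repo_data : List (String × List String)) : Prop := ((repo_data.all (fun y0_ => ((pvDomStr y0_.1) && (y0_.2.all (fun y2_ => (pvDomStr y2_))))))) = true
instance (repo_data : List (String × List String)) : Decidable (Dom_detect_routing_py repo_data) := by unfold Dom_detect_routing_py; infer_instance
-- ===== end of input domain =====

-- B replaces A's two independent any(...) scans with one pass carrying a deferred 'next' flag (alternative decomposition, same cost).
-- ===== PORT A =====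
def detect_routing_py (repo_data : List (String × List String)) : String :=
  let external_libs := PySem.Dict.getD (PySem.Dict.mk repo_data) "external_libraries_hint" []
  if external_libs.any (fun lib => PySem.Str.isIn "react-router" (PySem.Str.lower lib)) then
    "React Router"
  else if external_libs.any (fun lib => PySem.Str.isIn "next" (PySem.Str.lower lib)) then
    "Next.js Router"
  else
    "기본 라우팅"

-- ===== PORT B =====
-- single pass: return on react-router immediately, carry a 'found_next' flag
def detectRoutingLoop : List String → Bool → String
  | [], found_next => if found_next then "Next.js Router" else "기본 라우팅"
  | lib :: rest, found_next =>
    let low := PySem.Str.lower lib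
    if PySem.Str.isIn "react-router" low then "React Router"
    else detectRoutingLoop rest (found_next || PySem.Str.isIn "next" low)

def detect_routing_py_alt (repo_data : List (String × List String)) : String :=
  detectRoutingLoop (PySem.Dict.getD (PySem.Dict.mk repo_data) "external_libraries_hint" []) false

-- ===== PRECONDITION & SPEC =====
def Spec_detect_routing_py (repo_data : List (String × List String)) (out : String) : Prop := out = detect_routing_py_alt repo_data
instance (repo_data : List (String × List String)) (out : String) : Decidable (Spec_detect_routing_py repo_data out) := by unfold Spec_detect_routing_py; infer_instance

-- ===== CLAIM (what is proved, stated in full; the proofs are below) =====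
def Claim_equal_detect_routing_py : Prop := ∀ (repo_data : List (String × List String)), Dom_detect_routing_py repo_data → Spec_detect_routing_py repo_data (detect_routing_py repo_data)

-- ===== LEMMAS AND PROOFS =====

-- ===== VERDICT (by name: the statement is the Claim_ definition above) =====
lemma detectRoutingLoop_char (libs : List String) (found : Bool) :
    detectRoutingLoop libs found =
      if libs.any (fun lib => PySem.Str.isIn "react-router" (PySem.Str.lower lib)) then "React Router"
      else if found || libs.any (fun lib => PySem.Str.isIn "next" (PySem.Str.lower lib)) then "Next.js Router"
      else "기본 라우팅" := by
  induction libs generalizing found with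
  | nil => simp [detectRoutingLoop]
  | cons lib rest ih =>
    show (if PySem.Str.isIn "react-router" (PySem.Str.lower lib) = true then "React Router"
          else detectRoutingLoop rest (found || PySem.Str.isIn "next" (PySem.Str.lower lib))) = _
    rw [List.any_cons, List.any_cons]
    by_cases h : PySem.Str.isIn "react-router" (PySem.Str.lower lib) = true
    · rw [if_pos h, if_pos (by rw [h, Bool.true_or])]
    · have h' := eq_false_of_ne_true h
      rw [if_neg h, ih, h', Bool.false_or, Bool.or_assoc]

theorem detect_routing_py_spec : Claim_equal_detect_routing_py := by
  intro repo_data _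
  unfold Spec_detect_routing_py detect_routing_py detect_routing_py_alt
  rw [detectRoutingLoop_char]
  simp
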